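-- pv_equiv track=rewrite | github.com/HyperGammaSpaces/SacredEchoes | Tools/TSAGenerator/TSAGenerator.py | maketileIDmatrix
-- ===== SOURCE A (Python) =====
-- def maketileIDmatrix(tilearray, rowcount, columncount):
--     tileIDarray = [[0 for x in range(columncount)] for y in range(rowcount)] #Holds tile IDs
--     tilenum = 0
--     for x, row in enumerate(tilearray):
--         for y, column in enumerate(row):
--             tileIDarray[x][y] = tilenum
--             tilenum += 1
--     return tileIDarray
-- ===== SOURCE B (Python) =====
-- import itertools
--
-- def maketileIDmatrix(tilearray, rowcount, columncount):
--     tileIDarray = [[0] * columncount for _ in range(rowcount)]  # Holds tile IDs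
--     # starting ID of row x = total number of tiles in the rows before it
--     offsets = list(itertools.accumulate((len(row) for row in tilearray), initial=0))
--     for x, row in enumerate(tilearray):
--         for y in range(len(row)):
--             tileIDarray[x][y] = offsets[x] + y
--     return tileIDarray
-- ===== Notes on version B (the rewrite author's own statement) =====
-- stated objective: alternative
-- what changed: Instead of threading one mutable running counter through the nested loops, B precomputes each row's starting ID as the cumulative sum of the previous rows' lengths (itertools.accumulate) and fills cell (x,y) independently with offsets[x]+y.
import Mathlib
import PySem

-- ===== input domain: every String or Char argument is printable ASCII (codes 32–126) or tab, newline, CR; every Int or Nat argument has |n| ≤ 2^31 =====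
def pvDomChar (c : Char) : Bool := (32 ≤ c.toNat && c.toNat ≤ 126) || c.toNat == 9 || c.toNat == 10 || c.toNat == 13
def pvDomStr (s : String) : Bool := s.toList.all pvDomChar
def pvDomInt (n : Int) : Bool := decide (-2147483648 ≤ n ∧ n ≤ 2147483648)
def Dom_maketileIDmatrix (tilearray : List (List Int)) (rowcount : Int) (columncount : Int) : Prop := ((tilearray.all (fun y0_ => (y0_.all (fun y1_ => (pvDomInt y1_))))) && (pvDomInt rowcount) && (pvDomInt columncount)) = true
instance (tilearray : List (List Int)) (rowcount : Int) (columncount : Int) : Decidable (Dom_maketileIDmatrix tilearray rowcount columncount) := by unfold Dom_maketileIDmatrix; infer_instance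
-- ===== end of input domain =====

-- B replaces A's single running counter threaded through the nested loops by precomputed
-- per-row starting offsets (cumulative row lengths); alternative decomposition, same cost.


-- ===== PORT A =====
-- tileIDarray[x][y] = tilenum is ported with the total forms pyGetD/pySetD; exact under
-- Pre_, which keeps every index in range (Python raises IndexError exactly outside Pre_).
def maketileIDmatrix (tilearray : List (List Int)) (rowcount : Int) (columncount : Int) : List (List Int) :=
  let tileIDarray : List (List Int) :=
    (PySem.List.pyRange 0 rowcount 1).map (fun _ =>
      (PySem.List.pyRange 0 columncount 1).map (fun _ => (0 : Int)))
  let st :=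
    (PySem.List.enumerate tilearray 0).foldl (fun (st : List (List Int) × Int) xr =>
      (PySem.List.enumerate xr.2 0).foldl (fun (st2 : List (List Int) × Int) yc =>
        (PySem.List.pySetD st2.1 xr.1
          (PySem.List.pySetD (PySem.List.pyGetD st2.1 xr.1 []) yc.1 st2.2), st2.2 + 1)) st)
      (tileIDarray, 0)
  st.1

-- ===== PORT B =====
-- tileIDarray[x][y] = offsets[x] + y is ported with the same total forms pyGetD/pySetD,
-- exact under Pre_ (B raises IndexError exactly where A does).
def maketileIDmatrix_alt (tilearray : List (List Int)) (rowcount : Int) (columncount : Int) : List (List Int) :=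
  let tileIDarray : List (List Int) :=
    (PySem.List.pyRange 0 rowcount 1).map (fun _ => List.replicate columncount.toNat (0 : Int))
  let offsets : List Int := (tilearray.map (fun row => (row.length : Int))).scanl (· + ·) 0
  (PySem.List.enumerate tilearray 0).foldl (fun (m : List (List Int)) xr =>
    (PySem.List.pyRange 0 (xr.2.length : Int) 1).foldl (fun m2 y =>
      PySem.List.pySetD m2 xr.1
        (PySem.List.pySetD (PySem.List.pyGetD m2 xr.1 []) y
          (PySem.List.pyGetD offsets xr.1 0 + y))) m) tileIDarray

-- ===== PRECONDITION & SPEC =====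
-- Pre_: exactly the inputs on which the Pythons return: every NONEMPTY row k lies inside the
-- frame (k < rowcount and its length ≤ columncount); both Pythons raise IndexError otherwise
-- (empty rows perform no assignment, so they are unconstrained).
def Pre_maketileIDmatrix (tilearray : List (List Int)) (rowcount : Int) (columncount : Int) : Prop :=
  ∀ k (hk : k < tilearray.length), tilearray[k] ≠ [] →
    ((k : Int) < rowcount ∧ (tilearray[k].length : Int) ≤ columncount)
instance (tilearray : List (List Int)) (rowcount : Int) (columncount : Int) : Decidable (Pre_maketileIDmatrix tilearray rowcount columncount) := by unfold Pre_maketileIDmatrix; infer_instance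
def pvWitness_maketileIDmatrix : List (List Int) × Int × Int := ([[10, 20], [30]], 3, 2)

def Spec_maketileIDmatrix (tilearray : List (List Int)) (rowcount : Int) (columncount : Int) (out : List (List Int)) : Prop := out = maketileIDmatrix_alt tilearray rowcount columncount
instance (tilearray : List (List Int)) (rowcount : Int) (columncount : Int) (out : List (List Int)) : Decidable (Spec_maketileIDmatrix tilearray rowcount columncount out) := by unfold Spec_maketileIDmatrix; infer_instance

-- ===== CLAIM (what is proved, stated in full; the proofs are below) =====
def Claim_equal_maketileIDmatrix : Prop := ∀ (tilearray : List (List Int)) (rowcount : Int) (columncount : Int), Dom_maketileIDmatrix tilearray rowcount columncount → Pre_maketileIDmatrix tilearray rowcount columncount → Spec_maketileIDmatrix tilearray rowcount columncount (maketileIDmatrix tilearray rowcount columncount)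

-- ===== LEMMAS AND PROOFS =====

-- A's inner-loop step, with the target row index x fixed.
def stepA (x : Int) (st : List (List Int) × Int) (yc : Int × Int) : List (List Int) × Int :=
  (PySem.List.pySetD st.1 x
    (PySem.List.pySetD (PySem.List.pyGetD st.1 x []) yc.1 st.2), st.2 + 1)

-- B's inner-loop step, with the row index x and its starting offset fixed.
def stepB (x : Int) (off : Int) (m2 : List (List Int)) (y : Int) : List (List Int) :=
  PySem.List.pySetD m2 x (PySem.List.pySetD (PySem.List.pyGetD m2 x []) y (off + y))

-- r with positions y0 .. y0+n-1 overwritten by t, t+1, …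
def fillInto (r : List Int) (y0 : Nat) (n : Nat) (t : Int) : List Int :=
  r.take y0 ++ PySem.List.pyRange t (t + n) 1 ++ r.drop (y0 + n)

-- common normal form: the matrix after filling the rows of ta, starting at row s with counter t
def buildInto (m : List (List Int)) (s : Nat) : List (List Int) → Int → List (List Int)
  | [], _ => m
  | r :: rs, t =>
      buildInto (m.set s (fillInto (m.getD s []) 0 r.length t)) (s + 1) rs (t + (r.length : Int))

theorem set_getD_self : ∀ (m : List (List Int)) (s : Nat), m.set s (m.getD s []) = m
  | [], _ => by simp
  | a :: m', 0 => by simp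
  | a :: m', s + 1 => by
    simp only [List.set_cons_succ, List.getD_cons_succ, set_getD_self m' s]

theorem fillInto_zero (r : List Int) (y0 : Nat) (t : Int) : fillInto r y0 0 t = r := by
  unfold fillInto
  rw [PySem.List.pyRange_one_eq_nil (by simp)]
  simp

theorem take_set_succ : ∀ (r : List Int) (y0 : Nat) (t : Int), y0 < r.length →
    (r.set y0 t).take (y0 + 1) = r.take y0 ++ [t]
  | a :: r', 0, t, _ => by simp
  | a :: r', y0 + 1, t, h => by
    simp only [List.set_cons_succ, List.take_succ_cons, List.cons_append, List.cons.injEq,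
      true_and]
    exact take_set_succ r' y0 t (by simpa using h)

theorem fillInto_step (r : List Int) (y0 : Nat) (n : Nat) (t : Int)
    (h : y0 + n + 1 ≤ r.length) :
    fillInto (r.set y0 t) (y0 + 1) n (t + 1) = fillInto r y0 (n + 1) t := by
  unfold fillInto
  rw [take_set_succ r y0 t (by omega),
      List.drop_set_of_lt (show y0 < y0 + 1 + n by omega),
      PySem.List.pyRange_one_cons (show t < t + ((n + 1 : Nat) : Int) by push_cast; omega),
      show t + ((n + 1 : Nat) : Int) = (t + 1) + (n : Int) by push_cast; ring,
      show y0 + (n + 1) = y0 + 1 + n by omega]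
  simp

theorem inner_fold (row : List Int) : ∀ (y0 : Nat) (m : List (List Int)) (x : Nat) (t : Int),
    x < m.length → y0 + row.length ≤ (m.getD x []).length →
    (PySem.List.enumerate row (y0 : Int)).foldl (stepA (x : Int)) (m, t)
      = (m.set x (fillInto (m.getD x []) y0 row.length t), t + row.length) := by
  induction row with
  | nil =>
    intro y0 m x t hx hy
    rw [PySem.List.enumerate_nil, List.foldl_nil, List.length_nil, fillInto_zero,
      set_getD_self]
    simp
  | cons a row' ih =>
    intro y0 m x t hx hy
    rw [List.length_cons] at hy
    rw [PySem.List.enumerate_cons, List.foldl_cons]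
    have hstep : stepA (x : Int) (m, t) ((y0 : Int), a)
        = (m.set x ((m.getD x []).set y0 t), t + 1) := by
      simp [stepA]
    rw [hstep]
    have hcast : ((y0 : Int) + 1) = ((y0 + 1 : Nat) : Int) := by push_cast; ring
    have hget : (m.set x ((m.getD x []).set y0 t)).getD x [] = (m.getD x []).set y0 t := by
      simp [List.getD, hx]
    rw [hcast, ih (y0 + 1) _ x (t + 1) (by simpa using hx)
        (by rw [hget, List.length_set]; omega)]
    rw [hget, List.set_set, fillInto_step _ _ _ _ (by omega), List.length_cons,
      show t + 1 + (row'.length : Int) = t + ((row'.length + 1 : Nat) : Int) by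
        push_cast; ring]

theorem inner_fold_B (n : Nat) : ∀ (y0 : Nat) (m : List (List Int)) (x : Nat) (off : Int),
    x < m.length → y0 + n ≤ (m.getD x []).length →
    (PySem.List.pyRange (y0 : Int) ((y0 + n : Nat) : Int) 1).foldl (stepB (x : Int) off) m
      = m.set x (fillInto (m.getD x []) y0 n (off + y0)) := by
  induction n with
  | zero =>
    intro y0 m x off hx hy
    rw [PySem.List.pyRange_one_eq_nil (by simp), List.foldl_nil, fillInto_zero,
      set_getD_self]
  | succ n ih =>
    intro y0 m x off hx hy
    rw [PySem.List.pyRange_one_cons (show (y0 : Int) < ((y0 + (n + 1) : Nat) : Int) by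
        push_cast; omega), List.foldl_cons]
    have hstep : stepB (x : Int) off m (y0 : Int)
        = m.set x ((m.getD x []).set y0 (off + y0)) := by
      simp [stepB]
    rw [hstep]
    have hget : (m.set x ((m.getD x []).set y0 (off + y0))).getD x []
        = (m.getD x []).set y0 (off + y0) := by
      simp [List.getD, hx]
    rw [show ((y0 : Int) + 1) = ((y0 + 1 : Nat) : Int) by push_cast; ring,
      show ((y0 + (n + 1) : Nat) : Int) = (((y0 + 1) + n : Nat) : Int) by push_cast; ring,
      ih (y0 + 1) _ x off (by simpa using hx) (by rw [hget, List.length_set]; omega)]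
    rw [hget, List.set_set,
      show off + ((y0 + 1 : Nat) : Int) = (off + y0) + 1 by push_cast; ring,
      fillInto_step _ _ _ _ (by omega)]

theorem outer_fold (ta : List (List Int)) : ∀ (s : Nat) (m : List (List Int)) (t : Int),
    (∀ k (hk : k < ta.length), (ta[k]) ≠ [] →
      (s + k < m.length ∧ (ta[k]).length ≤ (m.getD (s + k) []).length)) →
    (PySem.List.enumerate ta (s : Int)).foldl
        (fun (st : List (List Int) × Int) xr =>
          (PySem.List.enumerate xr.2 0).foldl (stepA xr.1) st) (m, t)
      = (buildInto m s ta t, t + ((ta.map (fun r => (r.length : Int))).sum)) := by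
  induction ta with
  | nil =>
    intro s m t _
    rw [PySem.List.enumerate_nil]
    simp [buildInto]
  | cons r rs ih =>
    intro s m t hidx
    have hcast : ((s : Int) + 1) = ((s + 1 : Nat) : Int) := by push_cast; ring
    have hidx' : ∀ k (hk : k < rs.length), (rs[k]) ≠ [] →
        ((s + 1) + k < m.length ∧ (rs[k]).length ≤ (m.getD ((s + 1) + k) []).length) := by
      intro k hk hne
      have h2 := hidx (k + 1) (by simp; omega) (by simpa using hne)
      simp only [List.getElem_cons_succ] at h2
      rw [show (s + 1) + k = s + (k + 1) by omega]
      exact h2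
    rw [PySem.List.enumerate_cons, List.foldl_cons]
    by_cases hr : r = []
    · subst hr
      simp only [PySem.List.enumerate_nil, List.foldl_nil]
      have hb : buildInto m s ([] :: rs) t = buildInto m (s + 1) rs t := by
        show buildInto (m.set s (fillInto (m.getD s []) 0 ([] : List Int).length t)) (s + 1) rs
            (t + (([] : List Int).length : Int)) = buildInto m (s + 1) rs t
        rw [List.length_nil, fillInto_zero, set_getD_self]
        norm_num
      rw [hcast, ih (s + 1) m t hidx', hb]
      simp
    · obtain ⟨hx, hlenr⟩ := hidx 0 (by simp) (by simpa using hr)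
      simp only [Nat.add_zero, List.getElem_cons_zero] at hx hlenr
      have h0 : ((0 : Nat) : Int) = 0 := rfl
      have hin := inner_fold r 0 m s t hx (by simpa using hlenr)
      rw [h0] at hin
      rw [hin, hcast, ih (s + 1) _ (t + r.length)
          (by
            intro k hk hne
            have hgd : (m.set s (fillInto (m.getD s []) 0 r.length t)).getD ((s + 1) + k) []
                = m.getD ((s + 1) + k) [] := by
              simp [List.getD, List.getElem?_set_ne (show s ≠ (s + 1) + k by omega)]
            rw [List.length_set, hgd]
            exact hidx' k hk hne)]
      simp [buildInto]
      ring

theorem outer_fold_B (ta : List (List Int)) :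
    ∀ (s : Nat) (m : List (List Int)) (offsets : List Int) (t : Int),
    (∀ k (hk : k < ta.length), (ta[k]) ≠ [] →
      (s + k < m.length ∧ (ta[k]).length ≤ (m.getD (s + k) []).length)) →
    (∀ k, k < ta.length →
      offsets.getD (s + k) 0 = t + (((ta.take k).map (fun r => (r.length : Int))).sum)) →
    (PySem.List.enumerate ta (s : Int)).foldl
        (fun (m2 : List (List Int)) xr =>
          (PySem.List.pyRange 0 (xr.2.length : Int) 1).foldl
            (stepB xr.1 (PySem.List.pyGetD offsets xr.1 0)) m2) m
      = buildInto m s ta t := by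
  induction ta with
  | nil =>
    intro s m offsets t _ _
    rw [PySem.List.enumerate_nil]
    simp [buildInto]
  | cons r rs ih =>
    intro s m offsets t hidx hoff
    have hcast : ((s : Int) + 1) = ((s + 1 : Nat) : Int) := by push_cast; ring
    have hidx' : ∀ k (hk : k < rs.length), (rs[k]) ≠ [] →
        ((s + 1) + k < m.length ∧ (rs[k]).length ≤ (m.getD ((s + 1) + k) []).length) := by
      intro k hk hne
      have h2 := hidx (k + 1) (by simp; omega) (by simpa using hne)
      simp only [List.getElem_cons_succ] at h2
      rw [show (s + 1) + k = s + (k + 1) by omega]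
      exact h2
    have hoff' : ∀ k, k < rs.length →
        offsets.getD ((s + 1) + k) 0
          = (t + r.length) + (((rs.take k).map (fun r => (r.length : Int))).sum) := by
      intro k hk
      have h3 := hoff (k + 1) (by simp; omega)
      rw [show (s + 1) + k = s + (k + 1) by omega, h3]
      simp [List.take_succ_cons]
      ring
    have hofs : PySem.List.pyGetD offsets (s : Int) 0 = t := by
      have := hoff 0 (by simp)
      simpa using this
    rw [PySem.List.enumerate_cons, List.foldl_cons]
    by_cases hr : r = []
    · subst hr
      simp only [List.length_nil, Nat.cast_zero,
        PySem.List.pyRange_one_eq_nil (le_refl (0 : Int)), List.foldl_nil]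
      have hb : buildInto m s ([] :: rs) t = buildInto m (s + 1) rs t := by
        show buildInto (m.set s (fillInto (m.getD s []) 0 ([] : List Int).length t)) (s + 1) rs
            (t + (([] : List Int).length : Int)) = buildInto m (s + 1) rs t
        rw [List.length_nil, fillInto_zero, set_getD_self]
        norm_num
      rw [hcast, ih (s + 1) m offsets t hidx' (by simpa using hoff'), hb]
    · obtain ⟨hx, hlenr⟩ := hidx 0 (by simp) (by simpa using hr)
      simp only [Nat.add_zero, List.getElem_cons_zero] at hx hlenr
      have hin := inner_fold_B r.length 0 m s (PySem.List.pyGetD offsets (s : Int) 0)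
        hx (by simpa using hlenr)
      rw [show ((0 : Nat) : Int) = 0 from rfl,
        show ((0 + r.length : Nat) : Int) = (r.length : Int) by push_cast; ring] at hin
      rw [hin]
      simp only [hofs, add_zero]
      rw [hcast, ih (s + 1) _ offsets (t + r.length)
          (by
            intro k hk hne
            have hgd : (m.set s (fillInto (m.getD s []) 0 r.length t)).getD ((s + 1) + k) []
                = m.getD ((s + 1) + k) [] := by
              simp [List.getD, List.getElem?_set_ne (show s ≠ (s + 1) + k by omega)]
            rw [List.length_set, hgd]
            exact hidx' k hk hne)
          hoff']
      rfl

theorem scanl_getD : ∀ (l : List Int) (t : Int) (k : Nat), k < l.length →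
    (l.scanl (· + ·) t).getD k 0 = t + (l.take k).sum
  | a :: l', t, 0, _ => by simp
  | a :: l', t, k + 1, h => by
    rw [List.scanl_cons, List.getD_cons_succ, scanl_getD l' (t + a) k (by simpa using h),
      List.take_succ_cons, List.sum_cons]
    ring

-- ===== VERDICT (by name: the statement is the Claim_ definition above) =====
theorem maketileIDmatrix_spec : Claim_equal_maketileIDmatrix := by
  intro ta rc cc _ hpre
  unfold Spec_maketileIDmatrix maketileIDmatrix maketileIDmatrix_alt
  simp only []
  have hzrow : (PySem.List.pyRange 0 cc 1).map (fun _ => (0 : Int))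
      = List.replicate cc.toNat 0 := by
    rw [List.map_const', PySem.List.length_pyRange_one]
    simp
  have hinitA : (PySem.List.pyRange 0 rc 1).map (fun _ =>
        (PySem.List.pyRange 0 cc 1).map (fun _ => (0 : Int)))
      = List.replicate rc.toNat (List.replicate cc.toNat 0) := by
    rw [List.map_const', PySem.List.length_pyRange_one]
    simp [hzrow]
  have hinitB : (PySem.List.pyRange 0 rc 1).map (fun _ => List.replicate cc.toNat (0 : Int))
      = List.replicate rc.toNat (List.replicate cc.toNat 0) := by
    rw [List.map_const', PySem.List.length_pyRange_one]
    simp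
  have hidxh : ∀ k (hk : k < ta.length), (ta[k]) ≠ [] →
      (0 + k < (List.replicate rc.toNat (List.replicate cc.toNat (0 : Int))).length
        ∧ (ta[k]).length
          ≤ ((List.replicate rc.toNat (List.replicate cc.toNat (0 : Int))).getD (0 + k) []).length) := by
    intro k hk hne
    obtain ⟨h1, h2⟩ := hpre k hk hne
    have hkrc : k < rc.toNat := by omega
    have hgd : (List.replicate rc.toNat (List.replicate cc.toNat (0 : Int))).getD (0 + k) []
        = List.replicate cc.toNat 0 := by
      simp [List.getD, hkrc]
    rw [hgd]
    simp
    omega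
  have hfunA : (fun (st : List (List Int) × Int) (xr : Int × List Int) =>
        (PySem.List.enumerate xr.2 0).foldl (fun (st2 : List (List Int) × Int) yc =>
          (PySem.List.pySetD st2.1 xr.1
            (PySem.List.pySetD (PySem.List.pyGetD st2.1 xr.1 []) yc.1 st2.2), st2.2 + 1)) st)
      = (fun (st : List (List Int) × Int) xr =>
          (PySem.List.enumerate xr.2 0).foldl (stepA xr.1) st) := rfl
  have hfunB : (fun (m2 : List (List Int)) (xr : Int × List Int) =>
        (PySem.List.pyRange 0 (xr.2.length : Int) 1).foldl (fun m3 y =>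
          PySem.List.pySetD m3 xr.1
            (PySem.List.pySetD (PySem.List.pyGetD m3 xr.1 []) y
              (PySem.List.pyGetD ((ta.map (fun row => (row.length : Int))).scanl (· + ·) 0)
                xr.1 0 + y))) m2)
      = (fun (m2 : List (List Int)) xr =>
          (PySem.List.pyRange 0 (xr.2.length : Int) 1).foldl
            (stepB xr.1 (PySem.List.pyGetD
              ((ta.map (fun row => (row.length : Int))).scanl (· + ·) 0) xr.1 0)) m2) := rfl
  have hoffh : ∀ k, k < ta.length →
      ((ta.map (fun row => (row.length : Int))).scanl (· + ·) 0).getD (0 + k) 0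
        = 0 + (((ta.take k).map (fun r => (r.length : Int))).sum) := by
    intro k hk
    rw [show (0 : Nat) + k = k by omega,
      scanl_getD _ 0 k (by simpa using hk), List.map_take]
  have houterA := outer_fold ta 0 (List.replicate rc.toNat (List.replicate cc.toNat 0)) 0
    hidxh
  have houterB := outer_fold_B ta 0 (List.replicate rc.toNat (List.replicate cc.toNat 0))
    ((ta.map (fun row => (row.length : Int))).scanl (· + ·) 0) 0 hidxh hoffh
  rw [show ((0 : Nat) : Int) = 0 from rfl] at houterA houterB
  rw [hinitA, hinitB, hfunA, hfunB, houterA, houterB]
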